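-- pv_equiv track=rewrite | github.com/eulersformula/Lintcode-LeetCode | As_Far_from_Land_as_Possible.py | get_nearest_land_cell_dist
-- ===== SOURCE A (Python) =====
-- def get_nearest_land_cell_dist(land_boundary_coords, water_coords):
--     if len(land_boundary_coords) == 0 or len(water_coords) == 0:
--         return 0
--     max_dist = None
--     for (ii, jj) in water_coords:
--         # 第一遍实现时没有注意是要到land的最短距离
--         min_dist = None
--         for (i, j) in land_boundary_coords:
--             dist = abs(i-ii) + abs(j-jj)
--             if min_dist is None or min_dist > dist:
--                 min_dist = dist
--         if max_dist is None or max_dist < min_dist: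
--             max_dist = min_dist
--     return max_dist
-- ===== SOURCE B (Python) =====
-- def get_nearest_land_cell_dist(land_boundary_coords, water_coords):
--     if not land_boundary_coords or not water_coords:
--         return 0
--     (i0, j0) = land_boundary_coords[0]
--     mins = [abs(i0 - ii) + abs(j0 - jj) for (ii, jj) in water_coords]
--     for (i, j) in land_boundary_coords[1:]:
--         mins = [min(m, abs(i - ii) + abs(j - jj))
--                 for m, (ii, jj) in zip(mins, water_coords)]
--     return max(mins)
-- ===== Notes on version B (the rewrite author's own statement) =====
-- stated objective: alternative
-- what changed: B inverts the loop nesting: instead of scanning all land cells per water cell with None sentinels, it keeps one list of per-water running minima, updates it pointwise while making a single pass over the land cells, and returns max(mins).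
import Mathlib
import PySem

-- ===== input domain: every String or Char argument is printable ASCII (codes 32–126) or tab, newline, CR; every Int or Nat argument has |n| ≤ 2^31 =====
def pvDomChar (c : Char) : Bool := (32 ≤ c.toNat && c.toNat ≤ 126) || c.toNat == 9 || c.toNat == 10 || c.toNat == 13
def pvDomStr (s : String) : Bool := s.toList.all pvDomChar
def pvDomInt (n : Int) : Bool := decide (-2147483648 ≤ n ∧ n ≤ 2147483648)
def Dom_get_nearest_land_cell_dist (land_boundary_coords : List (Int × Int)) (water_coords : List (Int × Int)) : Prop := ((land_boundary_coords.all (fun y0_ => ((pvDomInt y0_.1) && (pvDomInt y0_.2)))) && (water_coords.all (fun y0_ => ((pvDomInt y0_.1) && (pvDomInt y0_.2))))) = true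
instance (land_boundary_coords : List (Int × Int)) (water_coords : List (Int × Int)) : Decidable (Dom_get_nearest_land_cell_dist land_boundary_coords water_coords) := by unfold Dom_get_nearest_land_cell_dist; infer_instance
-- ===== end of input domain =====

-- ===== PORT A =====
-- loop bodies of A, lifted to named helpers (same code, step for step)
def pvInnerStep (w : Int × Int) (min_dist : Option Int) (p : Int × Int) : Option Int :=
  let dist := |p.1 - w.1| + |p.2 - w.2|
  match min_dist with
  | none => some dist
  | some m => if m > dist then some dist else some m

def pvOuterStep (land : List (Int × Int)) (max_dist : Option Int) (w : Int × Int) : Option Int :=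
  let min_dist := land.foldl (pvInnerStep w) none
  match max_dist, min_dist with
  | none, _ => min_dist
  | some M, some mn => if M < mn then some mn else some M
  | some M, none => some M

def get_nearest_land_cell_dist (land_boundary_coords : List (Int × Int)) (water_coords : List (Int × Int)) : Int :=
  if land_boundary_coords.length = 0 ∨ water_coords.length = 0 then 0
  else
    -- Python returns max_dist, an int here (water_coords nonempty); the getD 0 branch is unreachable
    (water_coords.foldl (pvOuterStep land_boundary_coords) none).getD 0

-- ===== PORT B =====
-- B inverts the loop nesting: it keeps one list of per-water running minima, updated in a single pass over land cells.
def pvRelaxStep (water : List (Int × Int)) (ms : List Int) (p : Int × Int) : List Int :=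
  List.zipWith (fun m w => min m (|p.1 - w.1| + |p.2 - w.2|)) ms water

def get_nearest_land_cell_dist_alt (land_boundary_coords : List (Int × Int)) (water_coords : List (Int × Int)) : Int :=
  match land_boundary_coords, water_coords with
  | [], _ => 0
  | _, [] => 0
  | l :: ls, _ =>
    let mins0 := water_coords.map (fun w => |l.1 - w.1| + |l.2 - w.2|)
    let mins := ls.foldl (pvRelaxStep water_coords) mins0
    (PySem.List.max? mins (fun x => x)).getD 0

-- ===== PRECONDITION & SPEC =====
def Spec_get_nearest_land_cell_dist (land_boundary_coords : List (Int × Int)) (water_coords : List (Int × Int)) (out : Int) : Prop := out = get_nearest_land_cell_dist_alt land_boundary_coords water_coords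
instance (land_boundary_coords : List (Int × Int)) (water_coords : List (Int × Int)) (out : Int) : Decidable (Spec_get_nearest_land_cell_dist land_boundary_coords water_coords out) := by unfold Spec_get_nearest_land_cell_dist; infer_instance

-- ===== CLAIM (what is proved, stated in full; the proofs are below) =====
def Claim_equal_get_nearest_land_cell_dist : Prop := ∀ (land_boundary_coords : List (Int × Int)) (water_coords : List (Int × Int)), Dom_get_nearest_land_cell_dist land_boundary_coords water_coords → Spec_get_nearest_land_cell_dist land_boundary_coords water_coords (get_nearest_land_cell_dist land_boundary_coords water_coords)

-- ===== LEMMAS AND PROOFS =====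

-- Manhattan distance from land cell p to water cell w
def pvD (p w : Int × Int) : Int := |p.1 - w.1| + |p.2 - w.2|

-- the per-water minimum over land = l :: ls, as a plain Int fold
def pvMn (l : Int × Int) (ls : List (Int × Int)) (w : Int × Int) : Int :=
  ls.foldl (fun m p => min m (pvD p w)) (pvD l w)

theorem pvInnerStep_some (w : Int × Int) (a : Int) (p : Int × Int) :
    pvInnerStep w (some a) p = some (min a (pvD p w)) := by
  simp only [pvInnerStep, pvD]
  split_ifs <;> simp <;> omega

-- A's inner loop, continued from some a, computes the running min
theorem innerA_some (w : Int × Int) (ls : List (Int × Int)) (a : Int) :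
    ls.foldl (pvInnerStep w) (some a)
      = some (ls.foldl (fun m p => min m (pvD p w)) a) := by
  induction ls generalizing a with
  | nil => rfl
  | cons p t ih => simp only [List.foldl_cons, pvInnerStep_some, ih]

-- A's inner loop on nonempty land
theorem innerA_eq (w l : Int × Int) (ls : List (Int × Int)) :
    (l :: ls).foldl (pvInnerStep w) none = some (pvMn l ls w) := by
  have h0 : pvInnerStep w none l = some (pvD l w) := rfl
  simp only [List.foldl_cons, h0, innerA_some, pvMn]

theorem pvOuterStep_some (l : Int × Int) (ls : List (Int × Int)) (M : Int) (w : Int × Int) :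
    pvOuterStep (l :: ls) (some M) w = some (max M (pvMn l ls w)) := by
  simp only [pvOuterStep, innerA_eq]
  split_ifs <;> simp <;> omega

-- A's outer loop, continued from some M, is a running max of pvMn
theorem outerA_some (l : Int × Int) (ls ws : List (Int × Int)) (M : Int) :
    ws.foldl (pvOuterStep (l :: ls)) (some M)
      = some (ws.foldl (fun M w => max M (pvMn l ls w)) M) := by
  induction ws generalizing M with
  | nil => rfl
  | cons w t ih => simp only [List.foldl_cons, pvOuterStep_some, ih]

-- zipWith against water after mapping over water is a map over water
theorem zipWith_map_self {α β : Type} (g : β → α → β) (h : α → β) (xs : List α) :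
    List.zipWith (fun m w => g m w) (xs.map h) xs = xs.map (fun w => g (h w) w) := by
  induction xs with
  | nil => rfl
  | cons x t ih => simp [ih]

-- B's land pass keeps the invariant "mins = water.map (running min so far)"
theorem B_invariant (water : List (Int × Int)) (ls : List (Int × Int)) (h : (Int × Int) → Int) :
    ls.foldl (pvRelaxStep water) (water.map h)
      = water.map (fun w => ls.foldl (fun m p => min m (pvD p w)) (h w)) := by
  induction ls generalizing h with
  | nil => rfl
  | cons p t ih =>
    simp only [List.foldl_cons, pvRelaxStep]
    rw [zipWith_map_self (fun m w => min m (|p.1 - w.1| + |p.2 - w.2|)) h water]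
    rw [ih (fun w => min (h w) (|p.1 - w.1| + |p.2 - w.2|))]
    simp [pvD]

-- ===== VERDICT (by name: the statement is the Claim_ definition above) =====
theorem get_nearest_land_cell_dist_spec : Claim_equal_get_nearest_land_cell_dist := by
  intro land water _
  unfold Spec_get_nearest_land_cell_dist
  match land, water with
  | [], _ => simp [get_nearest_land_cell_dist, get_nearest_land_cell_dist_alt]
  | l :: ls, [] => simp [get_nearest_land_cell_dist, get_nearest_land_cell_dist_alt]
  | l :: ls, w :: ws =>
    unfold get_nearest_land_cell_dist get_nearest_land_cell_dist_alt
    rw [if_neg (by simp)]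
    have hfirst : pvOuterStep (l :: ls) none w = some (pvMn l ls w) := by
      simp only [pvOuterStep, innerA_eq]
    simp only [List.foldl_cons, hfirst, outerA_some]
    have hmap : List.map (fun w' => |l.1 - w'.1| + |l.2 - w'.2|) (w :: ws)
        = List.map (fun w' => pvD l w') (w :: ws) := by simp [pvD]
    rw [hmap, B_invariant (w :: ws) ls (fun w' => pvD l w')]
    simp only [List.map_cons]
    rw [PySem.List.max?_id_cons]
    simp only [Option.getD_some]
    rw [List.foldl_map]
    rfl
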